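-- pv_equiv track=rewrite | github.com/PhanterJR/phanterpwa | phanterpwa/interface/Admin/apps/admin/www/static/0.0.1/js/transcrypt/phanterpwa.apptools.components.datetimepicker.py | _sanitize_i18ns
-- ===== SOURCE A (Python) =====
-- def _sanitize_i18ns(value):
--     reserved_letters = {
--         "d": "&#100;",
--         "M": "&#77;",
--         "t": "&#116;",
--         "o": "&#111;",
--         "y": "&#121;",
--         "H": "&#72;",
--         "m": "&#109;",
--         "s": "&#115;"
--     }
--     for x in reserved_letters.keys():
--         if x in value:
--             value = value.replace(x, reserved_letters[x])
--     return value
-- ===== SOURCE B (Python) =====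
-- def _sanitize_i18ns(value):
--     out = []
--     for c in value:
--         if c == "d":
--             out.append("&#100;")
--         elif c == "M":
--             out.append("&#77;")
--         elif c == "t":
--             out.append("&#116;")
--         elif c == "o":
--             out.append("&#111;")
--         elif c == "y":
--             out.append("&#121;")
--         elif c == "H":
--             out.append("&#72;")
--         elif c == "m":
--             out.append("&#109;")
--         elif c == "s":
--             out.append("&#115;")
--         else:
--             out.append(c)
--     return "".join(out)
-- ===== Notes on version B (the rewrite author's own statement) =====
-- stated objective: alternative
-- what changed: Replaced the dict of reserved letters and the eight sequential value.replace scans by a single left-to-right character pass with an if/elif chain that appends each character's replacement (or the character itself) to a list, joined once at the end; correct because no entity string contains a reserved letter.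
import Mathlib
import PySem

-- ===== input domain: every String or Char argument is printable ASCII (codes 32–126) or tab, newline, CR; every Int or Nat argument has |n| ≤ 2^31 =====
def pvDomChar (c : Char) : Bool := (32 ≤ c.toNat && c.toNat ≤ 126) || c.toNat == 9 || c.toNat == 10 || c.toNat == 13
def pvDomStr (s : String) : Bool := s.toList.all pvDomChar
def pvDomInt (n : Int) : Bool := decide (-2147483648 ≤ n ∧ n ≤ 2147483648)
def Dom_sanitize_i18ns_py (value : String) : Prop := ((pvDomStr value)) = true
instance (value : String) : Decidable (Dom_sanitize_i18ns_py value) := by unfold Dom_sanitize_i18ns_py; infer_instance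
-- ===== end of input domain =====

-- B drops A's dict and its eight sequential value.replace scans: one character pass with an
-- if/elif chain appending each replacement to an accumulator list, joined once (alternative);
-- output proved identical because no entity string contains a reserved letter.

-- ===== PORT A =====
def pvReservedA : PySem.Dict String String :=
  PySem.Dict.ofList [("d","&#100;"), ("M","&#77;"), ("t","&#116;"), ("o","&#111;"),
                     ("y","&#121;"), ("H","&#72;"), ("m","&#109;"), ("s","&#115;")]

-- for x in reserved_letters.keys(): if x in value: value = value.replace(x, reserved_letters[x]); return value
def sanitize_i18ns_py (value : String) : String :=
  (PySem.Dict.keys pvReservedA).foldl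
    (fun v x => if PySem.Str.isIn x v then PySem.Str.replace v x (PySem.Dict.getD pvReservedA x "") else v)
    value

-- ===== PORT B =====
-- out = []; for c in value: if c == "d": out.append("&#100;") elif … else: out.append(c); return "".join(out)
def sanitize_i18ns_py_alt (value : String) : String :=
  PySem.Str.join ""
    (value.toList.foldl
      (fun out c =>
        if c = 'd' then out ++ ["&#100;"]
        else if c = 'M' then out ++ ["&#77;"]
        else if c = 't' then out ++ ["&#116;"]
        else if c = 'o' then out ++ ["&#111;"]
        else if c = 'y' then out ++ ["&#121;"]
        else if c = 'H' then out ++ ["&#72;"]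
        else if c = 'm' then out ++ ["&#109;"]
        else if c = 's' then out ++ ["&#115;"]
        else out ++ [String.ofList [c]])
      [])

-- ===== PRECONDITION & SPEC =====
def Spec_sanitize_i18ns_py (value : String) (out : String) : Prop := out = sanitize_i18ns_py_alt value
instance (value : String) (out : String) : Decidable (Spec_sanitize_i18ns_py value out) := by unfold Spec_sanitize_i18ns_py; infer_instance

-- ===== CLAIM (what is proved, stated in full; the proofs are below) =====
def Claim_equal_sanitize_i18ns_py : Prop := ∀ (value : String), Dom_sanitize_i18ns_py value → Spec_sanitize_i18ns_py value (sanitize_i18ns_py value)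

-- ===== LEMMAS AND PROOFS =====

-- B's per-character if/elif chain, as a function (used only by the proofs)
def pvEnt (c : Char) : String :=
  if c = 'd' then "&#100;"
  else if c = 'M' then "&#77;"
  else if c = 't' then "&#116;"
  else if c = 'o' then "&#111;"
  else if c = 'y' then "&#121;"
  else if c = 'H' then "&#72;"
  else if c = 'm' then "&#109;"
  else if c = 's' then "&#115;"
  else String.ofList [c]

theorem pv_foldl_append (l : List Char) (f : Char → String) :
    ∀ acc : List String, l.foldl (fun out c => out ++ [f c]) acc = acc ++ l.map f := by
  induction l with
  | nil => simp
  | cons c t ih => intro acc; simp [List.foldl_cons, ih]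

theorem pv_alt_map (value : String) :
    sanitize_i18ns_py_alt value = PySem.Str.join "" (value.toList.map pvEnt) := by
  unfold sanitize_i18ns_py_alt
  have h : value.toList.foldl
      (fun out c =>
        if c = 'd' then out ++ ["&#100;"]
        else if c = 'M' then out ++ ["&#77;"]
        else if c = 't' then out ++ ["&#116;"]
        else if c = 'o' then out ++ ["&#111;"]
        else if c = 'y' then out ++ ["&#121;"]
        else if c = 'H' then out ++ ["&#72;"]
        else if c = 'm' then out ++ ["&#109;"]
        else if c = 's' then out ++ ["&#115;"]
        else out ++ [String.ofList [c]])
      [] = value.toList.foldl (fun out c => out ++ [pvEnt c]) [] := by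
    apply List.foldl_ext
    intro out c _
    unfold pvEnt
    split_ifs <;> rfl
  rw [h, pv_foldl_append]
  simp

-- replacing a single-character pattern is a per-character flatMap
theorem pv_go_single (k : Char) (new : List Char) :
    ∀ (l : List Char) (fuel : Nat) (acc : List Char), l.length ≤ fuel →
    PySem.Chars.replace.go [k] new fuel l acc
      = acc.reverse ++ l.flatMap (fun c => if c = k then new else [c]) := by
  intro l
  induction l with
  | nil => intro fuel acc _; cases fuel <;> simp [PySem.Chars.replace.go]
  | cons c t ih =>
    intro fuel acc hfuel
    cases fuel with
    | zero => simp at hfuel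
    | succ f =>
      by_cases hc : c = k
      · subst hc
        have hpre : [c].isPrefixOf (c :: t) = true := by simp [List.isPrefixOf]
        simp only [PySem.Chars.replace.go, hpre, if_true, List.drop_succ_cons,
          List.length_nil, List.drop_zero, List.length_cons] at *
        rw [ih f (new.reverse ++ acc) (by omega)]
        simp
      · have hpre : [k].isPrefixOf (c :: t) = false := by
          simp [List.isPrefixOf]; exact fun h => (hc h.symm).elim
        simp only [PySem.Chars.replace.go, hpre, Bool.false_eq_true, if_false] at *
        rw [ih f (c :: acc) (by simp at hfuel; omega)]
        simp [hc]

theorem pv_replace_single (k : Char) (new s : List Char) :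
    PySem.Chars.replace s [k] new = s.flatMap (fun c => if c = k then new else [c]) := by
  rw [PySem.Chars.replace]
  simp only [List.isEmpty_cons, Bool.false_eq_true, if_false]
  exact pv_go_single k new s s.length [] (le_refl _)

theorem pv_singleton_infix {a : Char} {l : List Char} : [a] <:+: l ↔ a ∈ l := by
  constructor
  · intro h; exact List.singleton_sublist.mp h.sublist
  · intro h
    obtain ⟨s, t, rfl⟩ := List.append_of_mem h
    exact ⟨s, t, by simp⟩

-- one pass of A's loop body, on the character list
theorem pv_step_eq (ks new v : String) (k : Char) (hk : ks.toList = [k]) :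
    (if PySem.Str.isIn ks v then PySem.Str.replace v ks new else v).toList
      = v.toList.flatMap (fun c => if c = k then new.toList else [c]) := by
  by_cases h : PySem.Str.isIn ks v = true
  · rw [if_pos h]
    simp only [PySem.Str.toList_replace, hk]
    exact pv_replace_single k new.toList v.toList
  · rw [if_neg (by simpa using h)]
    have hmem : k ∉ v.toList := by
      intro hm
      apply h
      simp only [PySem.Str.isIn_eq]
      rw [hk]
      exact (PySem.Chars.isIn_iff_infix _ _).mpr (pv_singleton_infix.mpr hm)
    symm
    have hmap : v.toList.map (fun c => if c = k then new.toList else [c]) = v.toList.map (fun c => [c]) :=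
      List.map_congr_left (fun c hc => if_neg (fun (e : c = k) => hmem (e ▸ hc)))
    rw [List.flatMap_def, hmap, ← List.flatMap_def, List.flatMap_singleton']

theorem pv_flatMap_congr {α β : Type} (l : List α) (f g : α → List β) (h : ∀ c, f c = g c) :
    l.flatMap f = l.flatMap g := by rw [funext h]

theorem pv_keysA : PySem.Dict.keys pvReservedA = ["d","M","t","o","y","H","m","s"] := by decide

theorem pv_flatten_intersperse_nil (xs : List (List Char)) :
    (List.intersperse ([] : List Char) xs).flatten = xs.flatten := by
  induction xs with
  | nil => rfl
  | cons h t ih => cases t <;> simp_all [List.intersperse]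

theorem pv_toList_B (value : String) :
    (sanitize_i18ns_py_alt value).toList
      = value.toList.flatMap (fun c => (pvEnt c).toList) := by
  rw [pv_alt_map]
  simp [PySem.Str.toList_join, PySem.Chars.join, List.intercalate,
    pv_flatten_intersperse_nil, List.flatMap_def, Function.comp_def]

-- ===== VERDICT (by name: the statement is the Claim_ definition above) =====
theorem sanitize_i18ns_py_spec : Claim_equal_sanitize_i18ns_py := by
  intro value _
  unfold Spec_sanitize_i18ns_py
  have hlist : (sanitize_i18ns_py value).toList = (sanitize_i18ns_py_alt value).toList := by
    rw [pv_toList_B]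
    unfold sanitize_i18ns_py
    rw [pv_keysA]
    simp only [List.foldl_cons, List.foldl_nil]
    rw [pv_step_eq "s" _ _ 's' (by decide)]
    rw [pv_step_eq "m" _ _ 'm' (by decide)]
    rw [pv_step_eq "H" _ _ 'H' (by decide)]
    rw [pv_step_eq "y" _ _ 'y' (by decide)]
    rw [pv_step_eq "o" _ _ 'o' (by decide)]
    rw [pv_step_eq "t" _ _ 't' (by decide)]
    rw [pv_step_eq "M" _ _ 'M' (by decide)]
    rw [pv_step_eq "d" _ _ 'd' (by decide)]
    simp only [List.flatMap_assoc]
    refine pv_flatMap_congr _ _ _ (fun c => ?_)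
    by_cases hd : c = 'd'; · subst hd; decide
    by_cases hM : c = 'M'; · subst hM; decide
    by_cases ht : c = 't'; · subst ht; decide
    by_cases ho : c = 'o'; · subst ho; decide
    by_cases hy : c = 'y'; · subst hy; decide
    by_cases hH : c = 'H'; · subst hH; decide
    by_cases hm : c = 'm'; · subst hm; decide
    by_cases hs : c = 's'; · subst hs; decide
    simp [pvEnt, hd, hM, ht, ho, hy, hH, hm, hs]
  exact String.toList_inj.mp hlist
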